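-- pv_equiv track=rewrite | github.com/KauanyStefany/VetConectaNovo | processar_batch_avatares.py | gerar_script_download
-- ===== SOURCE A (Python) =====
-- def gerar_script_download(inicio, fim, urls_dict):
--     """Gera script de download para um lote"""
--     commands = []
--     for i in range(inicio, fim + 1):
--         if i in urls_dict:
--             commands.append(f'curl -s -o "static/img/usuarios/{i:08d}.jpg" "{urls_dict[i]}"')
--
--     script = " && ".join(commands)
--     script += f' && echo "✓ IDs {inicio}-{fim} baixados!"'
--     return script
-- ===== SOURCE B (Python) =====
-- def gerar_script_download(inicio, fim, urls_dict):
--     """Gera script de download para um lote"""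
--     ids = sorted(k for k in urls_dict if inicio <= k <= fim)
--     commands = [f'curl -s -o "static/img/usuarios/{k:08d}.jpg" "{urls_dict[k]}"'
--                 for k in ids]
--     return " && ".join(commands) + f' && echo "✓ IDs {inicio}-{fim} baixados!"'
-- ===== Notes on version B (the rewrite author's own statement) =====
-- stated objective: alternative
-- what changed: B builds the command list from the sorted dict keys that fall in [inicio, fim] instead of scanning every integer of the range and testing dict membership.
import Mathlib
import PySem

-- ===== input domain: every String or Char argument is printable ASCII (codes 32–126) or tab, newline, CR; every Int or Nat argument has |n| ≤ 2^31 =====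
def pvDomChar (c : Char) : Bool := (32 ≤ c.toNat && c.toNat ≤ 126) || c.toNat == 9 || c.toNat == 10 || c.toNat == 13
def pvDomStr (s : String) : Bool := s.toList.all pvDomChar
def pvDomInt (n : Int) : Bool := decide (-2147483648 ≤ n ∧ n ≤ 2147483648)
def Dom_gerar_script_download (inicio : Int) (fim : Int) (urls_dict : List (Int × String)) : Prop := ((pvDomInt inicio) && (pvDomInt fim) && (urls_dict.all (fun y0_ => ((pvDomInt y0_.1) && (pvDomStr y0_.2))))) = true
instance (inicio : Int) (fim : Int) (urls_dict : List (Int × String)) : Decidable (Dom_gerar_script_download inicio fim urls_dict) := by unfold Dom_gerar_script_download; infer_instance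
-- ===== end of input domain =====

-- B builds the command list from the sorted in-range dict keys instead of scanning
-- every integer of [inicio, fim] with a membership test per integer.

-- shared command builder: the f-string 'curl -s -o "static/img/usuarios/{i:08d}.jpg" "{url}"',
-- identical in both Pythons; {i:08d} = str(i).zfill(8) (exact for every int)
def pvCmd (i : Int) (url : String) : String :=
  "curl -s -o \"static/img/usuarios/" ++ PySem.Str.zfill (PySem.Int.toStr i) 8 ++ ".jpg\" \"" ++ url ++ "\""

-- shared trailer: ' && echo "✓ IDs {inicio}-{fim} baixados!"', identical in both Pythons
def pvTrailer (inicio fim : Int) : String :=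
  " && echo \"✓ IDs " ++ PySem.Int.toStr inicio ++ "-" ++ PySem.Int.toStr fim ++ " baixados!\""

-- ===== PORT A =====
def gerar_script_download (inicio : Int) (fim : Int) (urls_dict : List (Int × String)) : String :=
  PySem.Str.join " && "
    ((PySem.List.pyRange inicio (fim + 1) 1).foldl
      (fun acc i => if (PySem.Dict.mk urls_dict).contains i
        then acc ++ [pvCmd i (((PySem.Dict.mk urls_dict).get? i).getD "")] else acc) [])
    ++ pvTrailer inicio fim

-- ===== PORT B =====
def gerar_script_download_alt (inicio : Int) (fim : Int) (urls_dict : List (Int × String)) : String :=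
  PySem.Str.join " && "
    ((PySem.List.sorted ((PySem.Dict.mk urls_dict).keys.filter
        (fun k => decide (inicio ≤ k) && decide (k ≤ fim))) (fun x => x) false).map
      (fun k => pvCmd k (((PySem.Dict.mk urls_dict).get? k).getD "")))
    ++ pvTrailer inicio fim

-- ===== PRECONDITION & SPEC =====
-- Pre_ excludes association lists with duplicate keys: they encode no Python dict
-- (a Python dict cannot hold a key twice), so the list↔dict correspondence is ambiguous there.
def Pre_gerar_script_download (inicio : Int) (fim : Int) (urls_dict : List (Int × String)) : Prop :=
  (urls_dict.map Prod.fst).Nodup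
instance (inicio : Int) (fim : Int) (urls_dict : List (Int × String)) : Decidable (Pre_gerar_script_download inicio fim urls_dict) := by unfold Pre_gerar_script_download; infer_instance
def pvWitness_gerar_script_download : Int × Int × (List (Int × String)) := (1, 5, [(2, "u2"), (4, "u4")])
def Spec_gerar_script_download (inicio : Int) (fim : Int) (urls_dict : List (Int × String)) (out : String) : Prop := out = gerar_script_download_alt inicio fim urls_dict
instance (inicio : Int) (fim : Int) (urls_dict : List (Int × String)) (out : String) : Decidable (Spec_gerar_script_download inicio fim urls_dict out) := by unfold Spec_gerar_script_download; infer_instance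

-- ===== CLAIM (what is proved, stated in full; the proofs are below) =====
def Claim_equal_gerar_script_download : Prop := ∀ (inicio : Int) (fim : Int) (urls_dict : List (Int × String)), Dom_gerar_script_download inicio fim urls_dict → Pre_gerar_script_download inicio fim urls_dict → Spec_gerar_script_download inicio fim urls_dict (gerar_script_download inicio fim urls_dict)

-- ===== LEMMAS AND PROOFS =====

lemma pv_commands_eq (inicio fim : Int) (l : List (Int × String))
    (h : (l.map Prod.fst).Nodup) :
    (PySem.List.pyRange inicio (fim + 1) 1).filter (fun i => (PySem.Dict.mk l).contains i)
    = PySem.List.sorted ((PySem.Dict.mk l).keys.filter (fun k => decide (inicio ≤ k) && decide (k ≤ fim))) (fun x => x) false := by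
  have hkeys : (PySem.Dict.mk l).keys = l.map Prod.fst := by
    simp [PySem.Dict.keys]
  have hLsub : List.Sublist ((PySem.List.pyRange inicio (fim + 1) 1).filter (fun i => (PySem.Dict.mk l).contains i)) (PySem.List.pyRange inicio (fim + 1) 1) :=
    List.filter_sublist
  have hLpw : ((PySem.List.pyRange inicio (fim + 1) 1).filter (fun i => (PySem.Dict.mk l).contains i)).Pairwise (· < ·) :=
    (PySem.List.pairwise_lt_pyRange_one inicio (fim + 1)).sublist hLsub
  have hLnd : ((PySem.List.pyRange inicio (fim + 1) 1).filter (fun i => (PySem.Dict.mk l).contains i)).Nodup :=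
    hLpw.imp (fun hab => ne_of_lt hab)
  have hFnd : ((PySem.Dict.mk l).keys.filter (fun k => decide (inicio ≤ k) && decide (k ≤ fim))).Nodup := by
    rw [hkeys]; exact h.filter _
  have hperm : ((PySem.List.pyRange inicio (fim + 1) 1).filter (fun i => (PySem.Dict.mk l).contains i)).Perm
      ((PySem.Dict.mk l).keys.filter (fun k => decide (inicio ≤ k) && decide (k ≤ fim))) := by
    rw [List.perm_ext_iff_of_nodup hLnd hFnd]
    intro x
    simp only [List.mem_filter, PySem.List.mem_pyRange_one, PySem.Dict.contains_iff_mem_keys,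
      Bool.and_eq_true, decide_eq_true_eq]
    constructor
    · rintro ⟨⟨h1, h2⟩, h3⟩; exact ⟨h3, h1, by omega⟩
    · rintro ⟨h3, h1, h2⟩; exact ⟨⟨h1, by omega⟩, h3⟩
  exact (PySem.List.sorted_eq_of_perm_of_pairwise_lt _ _ _ hperm hLpw).symm

-- ===== VERDICT (by name: the statement is the Claim_ definition above) =====
theorem gerar_script_download_spec : Claim_equal_gerar_script_download := by
  intro inicio fim urls_dict _hdom hpre
  unfold Spec_gerar_script_download gerar_script_download gerar_script_download_alt
  rw [PySem.List.foldl_append_if]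
  rw [pv_commands_eq inicio fim urls_dict hpre]
  simp [List.nil_append]
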